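-- pv_equiv track=rewrite | github.com/FMsunyh/re_com | development/server/validate/commdity_recognition_validator.py | is_base64_code
-- ===== SOURCE A (Python) =====
-- def is_base64_code(s):
--     '''Check s is Base64.b64encode'''
--     if not isinstance(s ,str) or not s:
--         return False
--
--     _base64_code = ['A', 'B', 'C', 'D', 'E', 'F', 'G', 'H', 'I',
--                     'J', 'K', 'L', 'M', 'N', 'O', 'P', 'Q', 'R',
--                     'S', 'T', 'U', 'V', 'W', 'X', 'Y', 'Z', 'a',
--                     'b', 'c', 'd', 'e', 'f', 'g', 'h', 'i', 'j',
--                     'k', 'l', 'm', 'n', 'o', 'p', 'q', 'r', 's',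
--                     't', 'u', 'v', 'w', 'x', 'y', 'z', '0', '1',
--                     '2', '3', '4','5', '6', '7', '8', '9', '+',
--                     '/', '=' ]
--
--     # Check base64 OR codeCheck % 4
--     code_fail = [ i for i in s if i not in _base64_code]
--     if code_fail or len(s) % 4 != 0:
--         return False
--     return True
-- ===== SOURCE B (Python) =====
-- import re
--
-- _B64_RE = re.compile(r'[A-Za-z0-9+/=]*')
--
-- def is_base64_code(s):
--     '''Check s is Base64.b64encode'''
--     if not isinstance(s, str) or not s:
--         return False
--     return len(s) % 4 == 0 and _B64_RE.fullmatch(s) is not None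
-- ===== Notes on version B (the rewrite author's own statement) =====
-- stated objective: idiomatic
-- what changed: The explicit per-character loop that builds a list of offending characters is replaced by a single precompiled regex fullmatch over the base64 alphabet (with '=' allowed anywhere, as in A) combined with the length%4 test; no failure list is materialised.
import Mathlib
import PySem

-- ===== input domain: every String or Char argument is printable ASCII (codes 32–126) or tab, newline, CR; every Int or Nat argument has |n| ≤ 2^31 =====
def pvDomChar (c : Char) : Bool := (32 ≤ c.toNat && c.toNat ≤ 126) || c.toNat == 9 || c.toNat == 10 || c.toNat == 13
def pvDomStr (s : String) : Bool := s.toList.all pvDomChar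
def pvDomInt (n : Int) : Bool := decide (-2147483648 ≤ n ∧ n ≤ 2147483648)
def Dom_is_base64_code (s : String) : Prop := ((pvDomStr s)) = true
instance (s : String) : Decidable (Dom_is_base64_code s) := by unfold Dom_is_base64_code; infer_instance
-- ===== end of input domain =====

-- B replaces the explicit failure-list scan of A by a regex-style character-class match plus the length test; idiomatic, same result.

-- ===== PORT A =====
def pyBase64Code : List Char :=
  ['A', 'B', 'C', 'D', 'E', 'F', 'G', 'H', 'I',
   'J', 'K', 'L', 'M', 'N', 'O', 'P', 'Q', 'R',
   'S', 'T', 'U', 'V', 'W', 'X', 'Y', 'Z', 'a',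
   'b', 'c', 'd', 'e', 'f', 'g', 'h', 'i', 'j',
   'k', 'l', 'm', 'n', 'o', 'p', 'q', 'r', 's',
   't', 'u', 'v', 'w', 'x', 'y', 'z', '0', '1',
   '2', '3', '4', '5', '6', '7', '8', '9', '+',
   '/', '=']

def is_base64_code (s : String) : Bool :=
  if s.toList = [] then false
  else
    let code_fail := s.toList.filter (fun i => !(pyBase64Code.contains i))
    if code_fail ≠ [] ∨ PySem.Int.mod (PySem.Str.len s) 4 ≠ 0 then false
    else true

-- ===== PORT B =====
-- exact Lean rendering of re.fullmatch(r'[A-Za-z0-9+/=]*', s): every char of s lies in the class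
def b64Class (c : Char) : Bool :=
  ('A' ≤ c && c ≤ 'Z') || ('a' ≤ c && c ≤ 'z') || ('0' ≤ c && c ≤ '9')
    || c == '+' || c == '/' || c == '='

def is_base64_code_alt (s : String) : Bool :=
  if s.toList = [] then false
  else PySem.Int.mod (PySem.Str.len s) 4 == 0 && s.toList.all b64Class

-- ===== PRECONDITION & SPEC =====
def Spec_is_base64_code (s : String) (out : Bool) : Prop := out = is_base64_code_alt s
instance (s : String) (out : Bool) : Decidable (Spec_is_base64_code s out) := by unfold Spec_is_base64_code; infer_instance

-- ===== CLAIM (what is proved, stated in full; the proofs are below) =====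
def Claim_equal_is_base64_code : Prop := ∀ (s : String), Dom_is_base64_code s → Spec_is_base64_code s (is_base64_code s)

-- ===== LEMMAS AND PROOFS =====
theorem mem_pyBase64Code_iff (c : Char) : c ∈ pyBase64Code ↔ b64Class c = true := by
  simp only [pyBase64Code, b64Class, List.mem_cons, List.not_mem_nil, or_false,
    Bool.or_eq_true, Bool.and_eq_true, beq_iff_eq, Char.ext_iff, Char.le_def,
    UInt32.le_iff_toNat_le, ← UInt32.toNat_inj, decide_eq_true_eq, show ('A':Char).val.toNat = 65 from rfl, show ('B':Char).val.toNat = 66 from rfl, show ('C':Char).val.toNat = 67 from rfl, show ('D':Char).val.toNat = 68 from rfl, show ('E':Char).val.toNat = 69 from rfl, show ('F':Char).val.toNat = 70 from rfl, show ('G':Char).val.toNat = 71 from rfl, show ('H':Char).val.toNat = 72 from rfl, show ('I':Char).val.toNat = 73 from rfl, show ('J':Char).val.toNat = 74 from rfl, show ('K':Char).val.toNat = 75 from rfl, show ('L':Char).val.toNat = 76 from rfl, show ('M':Char).val.toNat = 77 from rfl, show ('N':Char).val.toNat = 78 from rfl, show ('O':Char).val.toNat = 79 from rfl, show ('P':Char).val.toNat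 = 80 from rfl, show ('Q':Char).val.toNat = 81 from rfl, show ('R':Char).val.toNat = 82 from rfl, show ('S':Char).val.toNat = 83 from rfl, show ('T':Char).val.toNat = 84 from rfl, show ('U':Char).val.toNat = 85 from rfl, show ('V':Char).val.toNat = 86 from rfl, show ('W':Char).val.toNat = 87 from rfl, show ('X':Char).val.toNat = 88 from rfl, show ('Y':Char).val.toNat = 89 from rfl, show ('Z':Char).val.toNat = 90 from rfl, show ('a':Char).val.toNat = 97 from rfl, show ('b':Char).val.toNat = 98 from rfl, show ('c':Char).val.toNat = 99 from rfl, show ('d':Char).val.toNat = 100 from rfl, show ('e':Char).val.toNat = 101 from rfl, show ('f':Char).val.toNat = 102 from rfl, show ('g':Char).val.toNat = 103 from rfl, show ('h':Char).val.toNat = 104 from rfl, show ('i':Char).val.toNat = 105 from rfl, show ('j':Char).val.toNat = 106 from rfl, show ('k':Char).val.toNat = 107 from rfl, show ('l':Char).val.toNat = 108 from rfl, show ('m':Char).val.toNat = 109 from rfl, show ('n':Char).val.toNat = 110 from rfl, show ('o':Char).val.toNat = 111 from rfl, show ('p':Char).val.toNat = 112 from rfl, show ('q':Char).val.toNat = 113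 from rfl, show ('r':Char).val.toNat = 114 from rfl, show ('s':Char).val.toNat = 115 from rfl, show ('t':Char).val.toNat = 116 from rfl, show ('u':Char).val.toNat = 117 from rfl, show ('v':Char).val.toNat = 118 from rfl, show ('w':Char).val.toNat = 119 from rfl, show ('x':Char).val.toNat = 120 from rfl, show ('y':Char).val.toNat = 121 from rfl, show ('z':Char).val.toNat = 122 from rfl, show ('0':Char).val.toNat = 48 from rfl, show ('1':Char).val.toNat = 49 from rfl, show ('2':Char).val.toNat = 50 from rfl, show ('3':Char).val.toNat = 51 from rfl, show ('4':Char).val.toNat = 52 from rfl, show ('5':Char).val.toNat = 53 from rfl, show ('6':Char).val.toNat = 54 from rfl, show ('7':Char).val.toNat = 55 from rfl, show ('8':Char).val.toNat = 56 from rfl, show ('9':Char).val.toNat = 57 from rfl, show ('+':Char).val.toNat = 43 from rfl, show ('/':Char).val.toNat = 47 from rfl, show ('=':Char).val.toNat = 61 from rfl]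
  omega

theorem filter_not_eq_nil_iff_all (l : List Char) :
    (l.filter (fun i => !(pyBase64Code.contains i)) = []) ↔ l.all b64Class = true := by
  simp [List.filter_eq_nil_iff, List.all_eq_true, mem_pyBase64Code_iff]

-- ===== VERDICT (by name: the statement is the Claim_ definition above) =====
theorem is_base64_code_spec : Claim_equal_is_base64_code := by
  intro s _
  unfold Spec_is_base64_code is_base64_code is_base64_code_alt
  by_cases hnil : s.toList = []
  · simp [hnil]
  · rw [if_neg hnil, if_neg hnil]
    have hmiff : PySem.Int.mod (PySem.Str.len s) 4 = 0 ↔ (4:Int) ∣ (s.length : Int) := by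
      rw [PySem.Str.len_eq, PySem.Int.mod_eq_zero_iff_dvd]
      simp
    by_cases hf : s.toList.filter (fun i => !(pyBase64Code.contains i)) = []
    · have hall : s.toList.all b64Class = true := (filter_not_eq_nil_iff_all s.toList).mp hf
      by_cases hm : PySem.Int.mod (PySem.Str.len s) 4 = 0
      · rw [if_neg (not_or.mpr ⟨fun h => h hf, fun h => h hm⟩)]
        have h2 : (s.length : Int) % 4 = 0 := Int.emod_eq_zero_of_dvd (hmiff.mp hm)
        simp [hall, h2]
      · rw [if_pos (Or.inr hm)]
        rw [hmiff] at hm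
        simp [hm]
    · rw [if_pos (Or.inl hf)]
      obtain ⟨x, hxf⟩ := List.exists_mem_of_ne_nil _ hf
      obtain ⟨hx, hpx⟩ := List.mem_filter.mp hxf
      have hnm : x ∉ pyBase64Code := by simpa using hpx
      have hbx : b64Class x = false := by
        rw [Bool.eq_false_iff]; intro h; exact hnm ((mem_pyBase64Code_iff x).mpr h)
      simp
      intro _
      exact ⟨x, hx, hbx⟩
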